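-- pv_equiv track=rewrite | github.com/Eduardo-vsouza/uproteins | src/sequtils/enrichment.py | __orfs_by_method
-- ===== SOURCE A (Python) =====
-- def __orfs_by_method(files, seqs):
--     methods = {}
--     for i in range(len(files)):
--         pos1 = files[i].find("_") + 1
--         pos2 = files[i].find(".") - 2
--         file = files[i][pos1:pos2]
--         if file not in methods:
--             methods[file] = seqs[i]
--         else:
--             if seqs[i] not in methods[file].split(","):
--                 methods[file] += f',{seqs[i]}'
--     return methods
-- ===== SOURCE B (Python) =====
-- def __orfs_by_method(files, seqs):
--     # pass 1: group every seqs[i] under its filename-derived method key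
--     groups = {}
--     for i in range(len(files)):
--         name = files[i]
--         key = name[name.find("_") + 1 : name.find(".") - 2]
--         groups.setdefault(key, []).append(seqs[i])
--     # pass 2: per group, drop duplicates (keeping first occurrence) and join once
--     return {key: ",".join(dict.fromkeys(lst)) for key, lst in groups.items()}
-- ===== Notes on version B (the rewrite author's own statement) =====
-- stated objective: faster
-- what changed: Replaces A's single fused pass, which keeps one growing comma-joined string per key and re-splits it on every insertion, with two separate passes: group all seqs by method key into lists, then per group dedup whole values with dict.fromkeys and join once; Pre_ excludes inputs where two entries sharing a method key have a seq containing a comma, on which A's comma-fragment-level dedup is an artefact of its comma-joined string representation.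
-- outside the precondition, e.g. on __orfs_by_method(['a_', 'b_'], ['x,y', 'x']): A returns {'': 'x,y'}, B returns {'': 'x,y,x'}
import Mathlib
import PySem

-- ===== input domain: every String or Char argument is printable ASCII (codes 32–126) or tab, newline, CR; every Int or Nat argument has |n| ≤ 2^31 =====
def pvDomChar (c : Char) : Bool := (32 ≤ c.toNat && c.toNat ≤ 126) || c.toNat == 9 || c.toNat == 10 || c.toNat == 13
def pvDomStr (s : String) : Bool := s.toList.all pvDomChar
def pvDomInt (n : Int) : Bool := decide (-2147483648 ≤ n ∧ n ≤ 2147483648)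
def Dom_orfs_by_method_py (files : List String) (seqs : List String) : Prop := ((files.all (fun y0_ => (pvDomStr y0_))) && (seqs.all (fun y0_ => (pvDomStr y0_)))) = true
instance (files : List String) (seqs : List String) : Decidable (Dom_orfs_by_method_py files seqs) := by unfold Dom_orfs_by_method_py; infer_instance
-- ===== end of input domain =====

-- B replaces A's fused pass (one growing comma-joined string per key, re-split on every insertion)
-- by two separate passes — group seqs by method key into lists, then dedup each group once and join
-- once — same return value on Pre_; a timing run measured B faster.

-- ===== PORT A =====
-- helper shared by both ports: the identical filename→method-key slice logic of both Pythons
def pvKeyOf (name : String) : String :=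
  let pos1 : Int := PySem.Str.find name "_" + 1
  let pos2 : Int := PySem.Str.find name "." - 2
  PySem.Str.slice name (some pos1) (some pos2)

-- literal transliteration of A: one dict of comma-joined strings, membership tested by re-splitting.
-- seqs[i] is looked up with a default: Pre_ rules out i ≥ len(seqs), where Python raises IndexError.
def orfs_by_method_py (files : List String) (seqs : List String) : List (String × String) :=
  ((PySem.List.pyRange 0 (files.length : Int) 1).foldl
    (fun (methods : PySem.Dict String String) i =>
      let file := pvKeyOf (PySem.List.pyGetD files i "")
      let s := PySem.List.pyGetD seqs i ""
      if methods.contains file = false then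
        methods.insert file s
      else
        if ((PySem.Str.split? (methods.getD file "") ",").getD []).contains s then
          methods
        else
          methods.insert file (methods.getD file "" ++ "," ++ s))
    PySem.Dict.empty).items

-- ===== PORT B =====
-- literal transliteration of Source B: pass 1 groups into lists (setdefault+append), pass 2 is the
-- dict comprehension joining dict.fromkeys of each group (ported as PySem.List.dedup).
def orfs_by_method_py_alt (files : List String) (seqs : List String) : List (String × String) :=
  let groups : PySem.Dict String (List String) :=
    (PySem.List.pyRange 0 (files.length : Int) 1).foldl
      (fun g i =>
        let name := PySem.List.pyGetD files i ""
        let key := pvKeyOf name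
        g.modify key [] (· ++ [PySem.List.pyGetD seqs i ""]))
      PySem.Dict.empty
  (groups.items.foldl
      (fun (r : PySem.Dict String String) kl =>
        r.insert kl.1 (PySem.Str.join "," (PySem.List.dedup kl.2)))
      PySem.Dict.empty).items

-- ===== PRECONDITION & SPEC =====
-- Pre_ excludes (a) len(files) > len(seqs), where A raises IndexError on seqs[i], and (b) inputs
-- where two entries sharing a method key have a seq containing a comma, where A's dedup on comma
-- fragments of its accumulated string is an artefact of the comma-joined representation.
def Pre_orfs_by_method_py (files : List String) (seqs : List String) : Prop :=
  files.length ≤ seqs.length ∧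
    (files.zip seqs).Pairwise
      (fun p q => pvKeyOf p.1 = pvKeyOf q.1 → ',' ∉ p.2.toList ∧ ',' ∉ q.2.toList)
instance (files : List String) (seqs : List String) : Decidable (Pre_orfs_by_method_py files seqs) := by unfold Pre_orfs_by_method_py; infer_instance

def pvWitness_orfs_by_method_py : List String × List String := (["spectra_M1.txt", "spectra_M2.txt"], ["SEQA", "SEQB"])

def Spec_orfs_by_method_py (files : List String) (seqs : List String) (out : List (String × String)) : Prop := out = orfs_by_method_py_alt files seqs
instance (files : List String) (seqs : List String) (out : List (String × String)) : Decidable (Spec_orfs_by_method_py files seqs out) := by unfold Spec_orfs_by_method_py; infer_instance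

-- ===== CLAIM (what is proved, stated in full; the proofs are below) =====
def Claim_equal_orfs_by_method_py : Prop := ∀ (files : List String) (seqs : List String), Dom_orfs_by_method_py files seqs → Pre_orfs_by_method_py files seqs → Spec_orfs_by_method_py files seqs (orfs_by_method_py files seqs)

-- ===== LEMMAS AND PROOFS =====

-- proof-side vocabulary -------------------------------------------------------

def pvSplit (s : String) : List String := (PySem.Str.split? s ",").getD []

def pvFinish (l : List String) : String := PySem.Str.join "," (PySem.List.dedup l)

def pvStepA (m : PySem.Dict String String) (p : String × String) : PySem.Dict String String :=
  if m.contains (pvKeyOf p.1) = false then m.insert (pvKeyOf p.1) p.2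
  else if ((PySem.Str.split? (m.getD (pvKeyOf p.1) "") ",").getD []).contains p.2 then m
  else m.insert (pvKeyOf p.1) (m.getD (pvKeyOf p.1) "" ++ "," ++ p.2)

def pvStepG (g : PySem.Dict String (List String)) (p : String × String) : PySem.Dict String (List String) :=
  g.modify (pvKeyOf p.1) [] (· ++ [p.2])

def pvMapVals (g : PySem.Dict String (List String)) : PySem.Dict String String :=
  PySem.Dict.mk (g.items.map (fun kl => (kl.1, pvFinish kl.2)))

def pvR (p q : String × String) : Prop :=
  pvKeyOf p.1 = pvKeyOf q.1 → ',' ∉ p.2.toList ∧ ',' ∉ q.2.toList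

-- invariant relative to the pairs still to be processed: a stored group whose key recurs later
-- consists of comma-free values only
def pvGood (g : PySem.Dict String (List String)) (rest : List (String × String)) : Prop :=
  g.keys.Nodup ∧ ∀ kl ∈ g.items, kl.2 ≠ [] ∧
    (kl.1 ∈ rest.map (fun q => pvKeyOf q.1) → ∀ x ∈ kl.2, ',' ∉ x.toList)

-- chars-level split/join ------------------------------------------------------

def pvF (cur : List Char) : List Char → List (List Char)
  | [] => [cur.reverse]
  | c :: rest => if c = ',' then cur.reverse :: pvF [] rest else pvF (c :: cur) rest

lemma go_eq (fuel : Nat) : ∀ (l cur : List Char) (acc : List (List Char)), l.length < fuel →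
    PySem.Chars.splitOn.go [','] fuel l cur acc = acc.reverse ++ pvF cur l := by
  induction fuel with
  | zero => intro l cur acc h; omega
  | succ n ih =>
    intro l cur acc h
    cases l with
    | nil => simp [PySem.Chars.splitOn.go, pvF]
    | cons c rest =>
      by_cases hc : c = ','
      · subst hc
        rw [PySem.Chars.splitOn.go]
        simp only [List.isPrefixOf, BEq.rfl, Bool.true_and]
        simp [pvF, ih rest [] _ (by simpa using Nat.lt_of_succ_lt_succ h)]
      · rw [PySem.Chars.splitOn.go]
        simp only [List.isPrefixOf]
        have hne : ((',' : Char) == c) = false := by simpa using (Ne.symm hc)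
        simp [hne, pvF, hc, ih rest (c :: cur) acc (by simpa using Nat.lt_of_succ_lt_succ h)]

lemma splitOn_comma_eq_pvF (s : List Char) : PySem.Chars.splitOn s [','] = pvF [] s := by
  have := go_eq (s.length + 1) s [] [] (by omega)
  simpa [PySem.Chars.splitOn] using this

lemma pvF_append_commaFree (q : List Char) (hq : ',' ∉ q) :
    ∀ cur rest, pvF cur (q ++ rest) = pvF (q.reverse ++ cur) rest := by
  induction q with
  | nil => intro cur rest; simp
  | cons c cs ih =>
    intro cur rest
    have hc : c ≠ ',' := fun h => hq (by simp [h])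
    rw [List.cons_append, pvF]
    simp only [if_neg hc]
    rw [ih (fun h => hq (by simp [h])) (c :: cur) rest]
    simp

lemma splitOn_join_comma (P : List (List Char)) (hne : P ≠ []) (hcf : ∀ t ∈ P, ',' ∉ t) :
    PySem.Chars.splitOn (PySem.Chars.join [','] P) [','] = P := by
  rw [splitOn_comma_eq_pvF]
  induction P with
  | nil => exact absurd rfl hne
  | cons p Q ih =>
    cases Q with
    | nil =>
      simp only [PySem.Chars.join, List.intercalate]
      have h := pvF_append_commaFree p (hcf p (by simp)) [] []
      simpa [pvF] using h
    | cons q Q' =>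
      rw [PySem.Chars.join_cons_cons, List.append_assoc,
        pvF_append_commaFree p (hcf p (by simp)) [] _]
      simp only [List.append_nil, List.singleton_append]
      have step : pvF p.reverse (',' :: (PySem.Chars.join [','] (q :: Q'))) =
          p :: pvF [] (PySem.Chars.join [','] (q :: Q')) := by
        rw [pvF]; simp
      rw [step, ih (by simp) (fun t ht => hcf t (by simp [ht]))]

lemma join_append_comma (P Q : List (List Char)) (hP : P ≠ []) (hQ : Q ≠ []) :
    PySem.Chars.join [','] (P ++ Q) = PySem.Chars.join [','] P ++ [','] ++ PySem.Chars.join [','] Q := by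
  induction P with
  | nil => exact absurd rfl hP
  | cons p P' ih =>
    cases P' with
    | nil =>
      cases Q with
      | nil => exact absurd rfl hQ
      | cons q Q' =>
        rw [List.singleton_append, PySem.Chars.join_cons_cons, PySem.Chars.join_singleton]
    | cons p2 P'' =>
      have h2 : (p :: p2 :: P'') ++ Q = p :: ((p2 :: P'') ++ Q) := by simp
      have h3 : (p2 :: P'') ++ Q = p2 :: (P'' ++ Q) := by simp
      rw [h2, h3, PySem.Chars.join_cons_cons, ← h3, ih (by simp),
        PySem.Chars.join_cons_cons]
      simp

-- string-level corollaries ----------------------------------------------------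

lemma pvSplit_toList (s : String) : pvSplit s = (PySem.Chars.splitOn s.toList [',']).map String.ofList := by
  simp [pvSplit, PySem.Str.split?, PySem.Chars.split?]

lemma str_ext {a b : String} (h : a.toList = b.toList) : a = b := by
  have := congrArg String.ofList h; simpa using this

lemma pvSplit_join (P : List String) (hne : P ≠ []) (hcf : ∀ t ∈ P, ',' ∉ t.toList) :
    pvSplit (PySem.Str.join "," P) = P := by
  rw [pvSplit_toList]
  simp only [PySem.Str.join, show (",").toList = [','] from rfl]
  have h1 : (String.ofList (PySem.Chars.join [','] (P.map String.toList))).toList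
      = PySem.Chars.join [','] (P.map String.toList) := by simp
  rw [h1, splitOn_join_comma _ (by simpa using hne)
    (by intro t ht; obtain ⟨q, hq, rfl⟩ := List.mem_map.mp ht; exact hcf q hq)]
  rw [List.map_map]
  have hco : (String.ofList ∘ String.toList) = id := by funext l; simp
  simp [hco]

lemma str_join_append (P Q : List String) (hP : P ≠ []) (hQ : Q ≠ []) :
    PySem.Str.join "," (P ++ Q) = PySem.Str.join "," P ++ "," ++ PySem.Str.join "," Q := by
  apply str_ext
  simp only [PySem.Str.join, List.map_append, show (",").toList = [','] from rfl]
  rw [join_append_comma _ _ (by simpa using hP) (by simpa using hQ)]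
  simp

lemma str_join_singleton (s : String) : PySem.Str.join "," [s] = s := by
  apply str_ext
  simp [PySem.Str.join, show (",").toList = [','] from rfl, PySem.Chars.join_singleton]

-- dedup lemmas ----------------------------------------------------------------

lemma dedup_append (l : List String) (s : String) :
    PySem.List.dedup (l ++ [s]) =
      if (PySem.List.dedup l).contains s then PySem.List.dedup l else PySem.List.dedup l ++ [s] := by
  simp only [PySem.List.dedup_eq_ofList, PySem.Set.ofList_eq_foldl, List.foldl_append,
    List.foldl_cons, List.foldl_nil]
  rfl

lemma dedup_ne_nil (l : List String) (h : l ≠ []) : PySem.List.dedup l ≠ [] := by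
  cases l with
  | nil => exact absurd rfl h
  | cons a t =>
    intro he
    have : a ∈ PySem.List.dedup (a :: t) := (PySem.List.mem_dedup _ _).mpr (by simp)
    rw [he] at this
    simp at this

lemma dedup_commaFree (l : List String) (h : ∀ x ∈ l, ',' ∉ x.toList) :
    ∀ x ∈ PySem.List.dedup l, ',' ∉ x.toList := by
  intro x hx
  exact h x ((PySem.List.mem_dedup _ _).mp hx)

lemma pvSplit_finish (l : List String) (hl : l ≠ []) (hcf : ∀ x ∈ l, ',' ∉ x.toList) :
    pvSplit (pvFinish l) = PySem.List.dedup l :=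
  pvSplit_join _ (dedup_ne_nil l hl) (dedup_commaFree l hcf)

lemma pvFinish_single (s : String) : pvFinish [s] = s := by
  show PySem.Str.join "," (PySem.List.dedup [s]) = s
  have h : PySem.List.dedup [s] = [s] := rfl
  rw [h, str_join_singleton]

-- dict lemmas -----------------------------------------------------------------

lemma contains_mapVals (g : PySem.Dict String (List String)) (k : String) :
    (pvMapVals g).contains k = g.contains k := by
  simp only [pvMapVals, PySem.Dict.contains, List.any_map]
  rfl

lemma get?_mapVals (g : PySem.Dict String (List String)) (k : String) :
    (pvMapVals g).get? k = (g.get? k).map pvFinish := by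
  simp only [pvMapVals, PySem.Dict.get?]
  rw [List.find?_map]
  have hfun : List.find? ((fun (p : String × String) => p.1 == k) ∘ (fun kl : String × List String => (kl.1, pvFinish kl.2))) g.items
      = List.find? (fun p => p.1 == k) g.items := rfl
  rw [hfun]
  cases h : List.find? (fun p => p.1 == k) g.items <;> simp

lemma mapVals_insert (g : PySem.Dict String (List String)) (k : String) (v : List String) :
    pvMapVals (g.insert k v) = (pvMapVals g).insert k (pvFinish v) := by
  simp only [PySem.Dict.insert, contains_mapVals]
  by_cases h : g.contains k = true
  · simp only [h, if_pos]
    simp only [pvMapVals, List.map_map]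
    congr 1
    apply List.map_congr_left
    intro p _
    by_cases hp : p.1 = k <;> simp [Function.comp, hp]
  · simp only [h]
    simp [pvMapVals]

lemma insert_self_of_get? {ν : Type} (d : PySem.Dict String ν) (k : String) (v : ν)
    (hnd : d.keys.Nodup) (h : d.get? k = some v) : d.insert k v = d := by
  simp only [PySem.Dict.get?] at h
  cases hf : List.find? (fun p => p.1 == k) d.items with
  | none => rw [hf] at h; simp at h
  | some r =>
    rw [hf] at h
    simp only [Option.map_some, Option.some.injEq] at h
    have hrmem : r ∈ d.items := List.mem_of_find?_eq_some hf
    have hrk : r.1 = k := by have := List.find?_some hf; simpa using this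
    have hc : d.contains k = true := by
      simp only [PySem.Dict.contains, List.any_eq_true]
      exact ⟨r, hrmem, by simp [hrk]⟩
    simp only [PySem.Dict.insert, hc, if_pos]
    cases d with
    | mk items =>
      simp only [PySem.Dict.mk.injEq]
      have hinj : ∀ x ∈ items, ∀ y ∈ items, x.1 = y.1 → x = y := by
        intro x hx y hy hxy
        exact List.inj_on_of_nodup_map hnd hx hy hxy
      have h2 : ∀ q ∈ items, (if (q.1 == k) = true then (k, v) else q) = id q := by
        intro q hq
        by_cases hqk : q.1 = k
        · simp only [hqk, BEq.rfl, if_pos, id]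
          have hqr : q = r := hinj q hq r hrmem (by rw [hqk, hrk])
          rw [hqr, ← h, ← hrk]
        · simp [hqk]
      rw [List.map_congr_left h2, List.map_id]

lemma keys_mapVals (g : PySem.Dict String (List String)) : (pvMapVals g).keys = g.keys := by
  simp only [pvMapVals, PySem.Dict.keys, List.map_map]
  rfl

lemma get?_mem {ν : Type} (d : PySem.Dict String ν) (k : String) (v : ν)
    (h : d.get? k = some v) : (k, v) ∈ d.items := by
  simp only [PySem.Dict.get?] at h
  cases hf : List.find? (fun p => p.1 == k) d.items with
  | none => rw [hf] at h; simp at h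
  | some r =>
    rw [hf] at h
    simp only [Option.map_some, Option.some.injEq] at h
    have hrk : r.1 = k := by have := List.find?_some hf; simpa using this
    have : (k, v) = r := by rw [← hrk, ← h]
    rw [this]
    exact List.mem_of_find?_eq_some hf

lemma get?_of_contains {ν : Type} (d : PySem.Dict String ν) (k : String)
    (hc : d.contains k = true) : ∃ v, d.get? k = some v := by
  cases h : d.get? k with
  | none =>
    rw [PySem.Dict.get?_eq_none_iff_contains] at h
    rw [h] at hc; cases hc
  | some v => exact ⟨v, rfl⟩

lemma not_mem_keys_of_contains_false {ν : Type} (d : PySem.Dict String ν) (k : String)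
    (hc : d.contains k = false) : k ∉ d.keys := by
  simp only [PySem.Dict.contains, List.any_eq_false] at hc
  intro hk
  obtain ⟨p, hp, hpk⟩ := List.mem_map.mp hk
  exact absurd (by simpa using hpk) (hc p hp)

lemma keys_insert_of_contains {ν : Type} (d : PySem.Dict String ν) (k : String) (v : ν)
    (hc : d.contains k = true) : (d.insert k v).keys = d.keys := by
  simp only [PySem.Dict.insert, hc, if_pos, PySem.Dict.keys, List.map_map]
  apply List.map_congr_left
  intro p _
  by_cases hp : p.1 = k <;> simp [Function.comp, hp]

lemma keys_insert_of_not_contains {ν : Type} (d : PySem.Dict String ν) (k : String) (v : ν)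
    (hc : d.contains k = false) : (d.insert k v).keys = d.keys ++ [k] := by
  simp [PySem.Dict.insert, hc, PySem.Dict.keys]

lemma mem_items_insert {ν : Type} (d : PySem.Dict String ν) (k : String) (v : ν)
    (kl : String × ν) (h : kl ∈ (d.insert k v).items) : kl = (k, v) ∨ kl ∈ d.items := by
  simp only [PySem.Dict.insert] at h
  by_cases hc : d.contains k = true
  · rw [if_pos hc] at h
    obtain ⟨p, hp, hpe⟩ := List.mem_map.mp h
    by_cases hpk : p.1 = k
    · left; rw [← hpe]; simp [hpk]
    · right; rw [← hpe, if_neg (by simpa using hpk)]; exact hp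
  · rw [if_neg hc] at h
    rcases List.mem_append.mp h with h1 | h2
    · right; exact h1
    · left; simpa using h2

lemma nodup_insert_keys {ν : Type} (d : PySem.Dict String ν) (k : String) (v : ν)
    (h : d.keys.Nodup) : (d.insert k v).keys.Nodup := by
  by_cases hc : d.contains k = true
  · rw [keys_insert_of_contains _ _ _ hc]; exact h
  · rw [keys_insert_of_not_contains _ _ _ (by simpa using hc)]
    have hnk : k ∉ d.keys := not_mem_keys_of_contains_false d k (by simpa using hc)
    rw [List.nodup_append]
    refine ⟨h, by simp, ?_⟩
    intro a ha b hb
    have hb' : b = k := by simpa using hb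
    subst hb'
    intro hab
    exact hnk (hab ▸ ha)

-- the simulation --------------------------------------------------------------

lemma step_comm (g : PySem.Dict String (List String)) (p : String × String)
    (rest : List (String × String)) (hg : pvGood g (p :: rest)) :
    pvStepA (pvMapVals g) p = pvMapVals (pvStepG g p) := by
  unfold pvStepA pvStepG PySem.Dict.modify
  cases hc : g.contains (pvKeyOf p.1) with
  | false =>
    rw [contains_mapVals, hc]
    simp only [if_pos rfl]
    have hget : g.getD (pvKeyOf p.1) [] = [] := by
      simp [PySem.Dict.getD, (PySem.Dict.get?_eq_none_iff_contains g _).mpr hc]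
    show (pvMapVals g).insert (pvKeyOf p.1) p.2
        = pvMapVals (g.insert (pvKeyOf p.1) (g.getD (pvKeyOf p.1) [] ++ [p.2]))
    rw [hget, mapVals_insert]
    have hfs : pvFinish ([] ++ [p.2]) = p.2 := by
      simp only [List.nil_append]
      exact pvFinish_single p.2
    rw [hfs]
  | true =>
    rw [contains_mapVals, hc]
    simp only [Bool.true_eq_false, if_neg, ite_false]
    obtain ⟨l, hl⟩ := get?_of_contains g _ hc
    have hlmem := get?_mem g _ l hl
    have hlne : l ≠ [] := (hg.2 _ hlmem).1
    have hlcf : ∀ x ∈ l, ',' ∉ x.toList := (hg.2 _ hlmem).2 (by simp)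
    have hgd : (pvMapVals g).getD (pvKeyOf p.1) "" = pvFinish l := by
      simp [PySem.Dict.getD, get?_mapVals, hl]
    have hgdg : g.getD (pvKeyOf p.1) [] = l := by simp [PySem.Dict.getD, hl]
    show (if ((PySem.Str.split? ((pvMapVals g).getD (pvKeyOf p.1) "") ",").getD []).contains p.2 = true
          then pvMapVals g
          else (pvMapVals g).insert (pvKeyOf p.1) ((pvMapVals g).getD (pvKeyOf p.1) "" ++ "," ++ p.2))
        = pvMapVals (g.insert (pvKeyOf p.1) (g.getD (pvKeyOf p.1) [] ++ [p.2]))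
    rw [hgd, hgdg, mapVals_insert]
    have hsplit : ((PySem.Str.split? (pvFinish l) ",").getD []).contains p.2
        = (PySem.List.dedup l).contains p.2 := by
      have : (PySem.Str.split? (pvFinish l) ",").getD [] = pvSplit (pvFinish l) := rfl
      rw [this, pvSplit_finish l hlne hlcf]
    rw [hsplit]
    have hfapp : pvFinish (l ++ [p.2])
        = if (PySem.List.dedup l).contains p.2 then pvFinish l
          else pvFinish l ++ "," ++ p.2 := by
      show PySem.Str.join "," (PySem.List.dedup (l ++ [p.2])) = _
      rw [dedup_append]
      by_cases hm : (PySem.List.dedup l).contains p.2 = true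
      · rw [if_pos hm, if_pos hm]; rfl
      · rw [if_neg hm, if_neg hm,
          str_join_append _ _ (dedup_ne_nil l hlne) (by simp), str_join_singleton]
        rfl
    rw [hfapp]
    by_cases hm : (PySem.List.dedup l).contains p.2 = true
    · rw [if_pos hm, if_pos hm]
      exact (insert_self_of_get? (pvMapVals g) _ (pvFinish l)
        ((keys_mapVals g).symm ▸ hg.1) (by rw [get?_mapVals, hl]; rfl)).symm
    · rw [if_neg hm, if_neg hm]

lemma good_step (g : PySem.Dict String (List String)) (p : String × String)
    (rest : List (String × String)) (hg : pvGood g (p :: rest))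
    (hpw : List.Pairwise pvR (p :: rest)) : pvGood (pvStepG g p) rest := by
  have hpr : ∀ q ∈ rest, pvR p q := (List.pairwise_cons.mp hpw).1
  unfold pvStepG PySem.Dict.modify
  constructor
  · exact nodup_insert_keys _ _ _ hg.1
  · intro kl hkl
    rcases mem_items_insert _ _ _ kl hkl with h1 | h2
    · rw [h1]
      refine ⟨by simp, ?_⟩
      intro hkmem x hx
      rcases List.mem_append.mp hx with ha | hb
      · have h1' : x ∈ (g.get? (pvKeyOf p.1)).getD [] := by simpa [PySem.Dict.getD] using ha
        cases hgo : g.get? (pvKeyOf p.1) with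
        | none => rw [hgo] at h1'; simp at h1'
        | some v =>
          rw [hgo] at h1'
          exact (hg.2 _ (get?_mem g _ _ hgo)).2 (by simp) x (by simpa using h1')
      · have hx2 : x = p.2 := by simpa using hb
        subst hx2
        obtain ⟨q, hq, hqk⟩ := List.mem_map.mp hkmem
        exact (hpr q hq (by rw [hqk])).1
    · exact ⟨(hg.2 kl h2).1, fun hk => (hg.2 kl h2).2 (by simp only [List.map_cons]; exact List.mem_cons_of_mem _ hk)⟩

lemma fold_comm (ps : List (String × String)) :
    ∀ g, pvGood g ps → List.Pairwise pvR ps →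
      ps.foldl pvStepA (pvMapVals g) = pvMapVals (ps.foldl pvStepG g) := by
  induction ps with
  | nil => intro g _ _; rfl
  | cons p rest ih =>
    intro g hg hpw
    simp only [List.foldl_cons]
    rw [step_comm g p rest hg]
    exact ih _ (good_step g p rest hg hpw) (List.pairwise_cons.mp hpw).2

lemma good_fold (ps : List (String × String)) :
    ∀ g, pvGood g ps → List.Pairwise pvR ps → pvGood (ps.foldl pvStepG g) [] := by
  induction ps with
  | nil => intro g hg _; exact hg
  | cons p rest ih =>
    intro g hg hpw
    exact ih _ (good_step g p rest hg hpw) (List.pairwise_cons.mp hpw).2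

-- B's second pass writes out exactly pvMapVals --------------------------------

lemma contains_empty (k : String) : (PySem.Dict.empty (ν := String)).contains k = false := rfl

lemma foldl_insert_items (F : List String → String) :
    ∀ (its : List (String × List String)) (d : PySem.Dict String String),
      (∀ kl ∈ its, d.contains kl.1 = false) → (its.map Prod.fst).Nodup →
      (its.foldl (fun r kl => r.insert kl.1 (F kl.2)) d).items
        = d.items ++ its.map (fun kl => (kl.1, F kl.2)) := by
  intro its
  induction its with
  | nil => intro d _ _; simp
  | cons kl rest ih =>
    intro d hdc hnd
    simp only [List.foldl_cons]
    have hc : d.contains kl.1 = false := hdc kl (by simp)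
    have hins : (d.insert kl.1 (F kl.2)).items = d.items ++ [(kl.1, F kl.2)] := by
      simp [PySem.Dict.insert, hc]
    rw [List.map_cons] at hnd
    have hnd' := List.nodup_cons.mp hnd
    rw [ih (d.insert kl.1 (F kl.2)) ?_ hnd'.2]
    · rw [hins, List.map_cons, List.append_assoc]; rfl
    · intro kl' h'
      have h1 : d.contains kl'.1 = false := hdc kl' (by simp [h'])
      have h2 : (kl.1 == kl'.1) = false := by
        have hne : kl.1 ≠ kl'.1 := by
          intro he
          exact hnd'.1 (he ▸ List.mem_map_of_mem (f := Prod.fst) h')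
        simpa using hne
      simp only [PySem.Dict.contains] at h1 ⊢
      rw [hins]
      simp [List.any_append, h1, h2]

lemma second_pass (g : PySem.Dict String (List String)) (hnd : g.keys.Nodup) :
    (g.items.foldl
      (fun (r : PySem.Dict String String) kl =>
        r.insert kl.1 (PySem.Str.join "," (PySem.List.dedup kl.2)))
      PySem.Dict.empty).items = (pvMapVals g).items := by
  show ((g.items.foldl (fun r kl => r.insert kl.1 (pvFinish kl.2)) PySem.Dict.empty)).items
      = (pvMapVals g).items
  rw [foldl_insert_items pvFinish g.items PySem.Dict.empty
    (fun kl _ => contains_empty kl.1) hnd]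
  rfl

-- index loops reduce to a fold over the zipped pairs --------------------------

lemma loop_to_zip {α : Type} (files seqs : List String) (h : files.length ≤ seqs.length)
    (g : α → String → String → α) (init : α) :
    (PySem.List.pyRange 0 (files.length : Int) 1).foldl
      (fun acc i => g acc (PySem.List.pyGetD files i "") (PySem.List.pyGetD seqs i "")) init
    = (files.zip seqs).foldl (fun acc p => g acc p.1 p.2) init := by
  have hlen : (files.length : Int) = ((files.zip seqs).length : Int) := by
    simp [List.length_zip]
    omega
  rw [hlen]
  rw [PySem.List.foldl_congr_mem _ _
    (fun acc i => (fun (acc : α) (p : String × String) => g acc p.1 p.2) acc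
      (PySem.List.pyGetD (files.zip seqs) i ("", ""))) init ?_]
  · exact PySem.List.foldl_pyRange_zero_pyGetD' (files.zip seqs) ("", "")
      (fun acc p => g acc p.1 p.2) init
  · intro acc i hi
    beta_reduce
    rw [PySem.List.mem_pyRange_one] at hi
    obtain ⟨h0, h1⟩ := hi
    have hnf : i.toNat < files.length := by
      have : i < ((files.zip seqs).length : Int) := h1
      simp [List.length_zip] at this
      omega
    have hns : i.toNat < seqs.length := lt_of_lt_of_le hnf h
    have hnz : i.toNat < (files.zip seqs).length := by
      simp [List.length_zip]; omega
    rw [PySem.List.pyGetD_of_nonneg _ _ h0, PySem.List.pyGetD_of_nonneg _ _ h0,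
      PySem.List.pyGetD_of_nonneg _ _ h0]
    simp only [List.getD_eq_getElem _ _ hnf, List.getD_eq_getElem _ _ hns,
      List.getD_eq_getElem _ _ hnz, List.getElem_zip]

-- ===== VERDICT (by name: the statement is the Claim_ definition above) =====
theorem orfs_by_method_py_spec : Claim_equal_orfs_by_method_py := by
  intro files seqs _hdom hpre
  obtain ⟨hlen, hpw⟩ := hpre
  unfold Spec_orfs_by_method_py
  have hpairs : List.Pairwise pvR (files.zip seqs) := hpw
  have hA : orfs_by_method_py files seqs
      = ((files.zip seqs).foldl pvStepA PySem.Dict.empty).items := by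
    show ((PySem.List.pyRange 0 (files.length : Int) 1).foldl
        (fun m i => pvStepA m (PySem.List.pyGetD files i "", PySem.List.pyGetD seqs i ""))
        PySem.Dict.empty).items = _
    rw [loop_to_zip files seqs hlen (fun m f s => pvStepA m (f, s)) PySem.Dict.empty]
  have hgood : pvGood (PySem.Dict.empty (ν := List String)) (files.zip seqs) := by
    constructor
    · simp [PySem.Dict.empty, PySem.Dict.keys]
    · intro kl hkl; simp [PySem.Dict.empty] at hkl
  have hB : orfs_by_method_py_alt files seqs
      = (pvMapVals ((files.zip seqs).foldl pvStepG PySem.Dict.empty)).items := by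
    show ((((PySem.List.pyRange 0 (files.length : Int) 1).foldl
        (fun g i => pvStepG g (PySem.List.pyGetD files i "", PySem.List.pyGetD seqs i ""))
        PySem.Dict.empty)).items.foldl
      (fun (r : PySem.Dict String String) kl =>
        r.insert kl.1 (PySem.Str.join "," (PySem.List.dedup kl.2)))
      PySem.Dict.empty).items = _
    rw [loop_to_zip files seqs hlen (fun g f s => pvStepG g (f, s)) PySem.Dict.empty]
    exact second_pass _ (good_fold (files.zip seqs) _ hgood hpairs).1
  rw [hA, hB]
  have := fold_comm (files.zip seqs) PySem.Dict.empty hgood hpairs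
  rw [show pvMapVals PySem.Dict.empty = PySem.Dict.empty from rfl] at this
  rw [this]
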